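-- pv_equiv track=rewrite | github.com/MrBrantCode/unitest_baseline | mut_generate/mist_train_taco/taco_902/solution.py | minimum_dice_rolls_to_goal
-- ===== SOURCE A (Python) =====
-- import heapq
-- from collections import defaultdict
--
-- def minimum_dice_rolls_to_goal(N, squares):
--     # Create a graph representation of the Sugoroku board
--     graph = defaultdict(list)
--
--     for i in range(N):
--         if squares[i] == 0:
--             # If the square has no special effect, add edges for dice rolls
--             for j in range(1, 7):
--                 if i + j < N:
--                     graph[i].append((i + j, 1))
--                 else:
--                     # If moving beyond the goal, consider it as reaching the goal
--                     graph[i].append((N - 1, 1))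
--         else:
--             # If the square has a special effect, add the corresponding edge
--             next_square = i + squares[i]
--             if 0 <= next_square < N:
--                 graph[i].append((next_square, 0))
--             else:
--                 # If the effect moves beyond the goal, consider it as reaching the goal
--                 graph[i].append((N - 1, 0))
--
--     # Dijkstra's algorithm to find the shortest path to the goal
--     def dijkstra(start):
--         distances = defaultdict(lambda: float('inf'))
--         distances[start] = 0
--         priority_queue = [(0, start)]
--         visited = set()
--
--         while priority_queue:
--             current_distance, current_square = heapq.heappop(priority_queue)
--
--             if current_square in visited:
--                 continue
--             visited.add(current_square)
--
--             if current_square == N - 1: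
--                 return current_distance
--
--             for neighbor, weight in graph[current_square]:
--                 if neighbor in visited:
--                     continue
--                 new_distance = current_distance + weight
--                 if new_distance < distances[neighbor]:
--                     distances[neighbor] = new_distance
--                     heapq.heappush(priority_queue, (new_distance, neighbor))
--
--         return -1
--
--     # Start from the first square (index 0)
--     return dijkstra(0)
-- ===== SOURCE B (Python) =====
-- def minimum_dice_rolls_to_goal(N, squares):
--     # Bellman-Ford relaxation to a fixpoint over the same board graph,
--     # instead of Dijkstra with a heap.
--     if N <= 0:
--         return -1
--     edges = []
--     for i in range(N):
--         s = squares[i]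
--         if s == 0:
--             for j in range(1, 7):
--                 edges.append((i, i + j if i + j < N else N - 1, 1))
--         else:
--             t = i + s
--             edges.append((i, t if 0 <= t < N else N - 1, 0))
--     dist = [None] * N
--     dist[0] = 0
--     changed = True
--     while changed:
--         changed = False
--         for (u, v, w) in edges:
--             if dist[u] is not None and (dist[v] is None or dist[u] + w < dist[v]):
--                 dist[v] = dist[u] + w
--                 changed = True
--     return dist[N - 1] if dist[N - 1] is not None else -1
-- ===== Notes on version B (the rewrite author's own statement) =====
-- stated objective: alternative
-- what changed: Replaces A's heap-based Dijkstra over an adjacency defaultdict by Bellman-Ford: B builds a flat edge list once and repeatedly relaxes every edge until a full pass makes no change, reading the answer off the distance array.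
import Mathlib
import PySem

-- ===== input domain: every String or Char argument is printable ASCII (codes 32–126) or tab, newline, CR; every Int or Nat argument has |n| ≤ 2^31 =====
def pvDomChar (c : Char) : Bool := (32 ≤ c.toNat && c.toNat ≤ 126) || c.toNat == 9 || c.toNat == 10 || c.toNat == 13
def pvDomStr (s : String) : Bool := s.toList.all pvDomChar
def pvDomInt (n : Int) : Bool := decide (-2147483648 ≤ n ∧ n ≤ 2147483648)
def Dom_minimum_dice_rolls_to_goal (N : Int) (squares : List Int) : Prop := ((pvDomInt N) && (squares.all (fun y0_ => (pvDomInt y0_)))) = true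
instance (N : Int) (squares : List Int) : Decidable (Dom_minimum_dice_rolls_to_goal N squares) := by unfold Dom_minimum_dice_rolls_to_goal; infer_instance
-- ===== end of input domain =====

-- B replaces A's heap-based Dijkstra by Bellman–Ford relaxation of an edge list to a fixpoint
-- (objective: alternative algorithm of similar cost; return values proved equal on Pre_).

-- ===== PORT A =====
-- A's priority queue is ported at value level: heappop returns the lexicographically
-- smallest (distance, node) tuple; the heap is kept as the plain list of its entries
-- (a multiset-faithful port of heapq: heappop's VALUE is exactly the minimum tuple).
def pvPairLt (a b : Int × Int) : Bool := a.1 < b.1 || (a.1 == b.1 && a.2 < b.2)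

def pvFoldMin (p : Int × Int) (rest : List (Int × Int)) : Int × Int :=
  rest.foldl (fun m x => if pvPairLt x m then x else m) p

def pvPopMin (pq : List (Int × Int)) : Option ((Int × Int) × List (Int × Int)) :=
  match pq with
  | [] => none
  | p :: rest =>
      let m := pvFoldMin p rest
      some (m, (p :: rest).erase m)

-- float('inf') appears only as the defaultdict default: a missing key (none) IS infinity.
def pvLtInf (nd : Int) (o : Option Int) : Bool :=
  match o with
  | none => true
  | some dv => nd < dv

-- the inner `for neighbor, weight in graph[current_square]` loop
def pvRelaxA (d : Int) (vis : PySem.Set Int) (st : PySem.Dict Int Int × List (Int × Int))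
    (edges : List (Int × Int)) : PySem.Dict Int Int × List (Int × Int) :=
  edges.foldl (fun st e =>
    if PySem.Set.contains vis e.1 then st
    else if pvLtInf (d + e.2) (st.1.get? e.1) then
      (st.1.insert e.1 (d + e.2), (d + e.2, e.1) :: st.2)
    else st) st

-- termination helpers for the while-loop (measure: unfinished nodes, then queue size)
def pvNodes (g : PySem.Dict Int (List (Int × Int))) : Finset Int :=
  (g.items.flatMap (fun kv => kv.1 :: kv.2.map (·.1))).toFinset

def pvPqNodes (pq : List (Int × Int)) : Finset Int := (pq.map (·.2)).toFinset

theorem pvFoldMin_mem (rest : List (Int × Int)) (p : Int × Int) :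
    pvFoldMin p rest = p ∨ pvFoldMin p rest ∈ rest := by
  induction rest generalizing p with
  | nil => simp [pvFoldMin]
  | cons x xs ih =>
    simp only [pvFoldMin, List.foldl_cons]
    rcases ih (if pvPairLt x p then x else p) with h | h
    · rw [pvFoldMin] at h
      rw [h]; split <;> simp_all
    · right
      rw [pvFoldMin] at h
      simp [h]

theorem pvPopMin_mem {pq : List (Int × Int)} {m : Int × Int} {r : List (Int × Int)}
    (h : pvPopMin pq = some (m, r)) : m ∈ pq := by
  cases pq with
  | nil => simp [pvPopMin] at h
  | cons p rest =>
    simp only [pvPopMin, Option.some.injEq, Prod.mk.injEq] at h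
    rcases h with ⟨h1, -⟩
    rw [← h1]
    rcases pvFoldMin_mem rest p with h' | h' <;> simp [h']

theorem pvPopMin_rest {pq : List (Int × Int)} {m : Int × Int} {r : List (Int × Int)}
    (h : pvPopMin pq = some (m, r)) : r = pq.erase m := by
  cases pq with
  | nil => simp [pvPopMin] at h
  | cons p rest =>
    simp only [pvPopMin, Option.some.injEq, Prod.mk.injEq] at h
    rw [← h.2, h.1]

theorem pvRelaxA_step_pq (d : Int) (vis : PySem.Set Int)
    (st : PySem.Dict Int Int × List (Int × Int)) (e : Int × Int) {p : Int × Int}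
    (h : p ∈ ((fun st (e : Int × Int) =>
      if PySem.Set.contains vis e.1 then st
      else if pvLtInf (d + e.2) (st.1.get? e.1) then
        (st.1.insert e.1 (d + e.2), (d + e.2, e.1) :: st.2)
      else st) st e).2) : p ∈ st.2 ∨ p.2 = e.1 := by
  dsimp only at h
  split at h
  · exact Or.inl h
  · split at h
    · rcases List.mem_cons.mp h with h | h
      · rw [h]; exact Or.inr rfl
      · exact Or.inl h
    · exact Or.inl h

theorem pvRelaxA_pq_mem {d : Int} {vis : PySem.Set Int} {st : PySem.Dict Int Int × List (Int × Int)}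
    {edges : List (Int × Int)} {p : Int × Int}
    (h : p ∈ (pvRelaxA d vis st edges).2) : p ∈ st.2 ∨ p.2 ∈ edges.map (·.1) := by
  induction edges generalizing st with
  | nil => exact Or.inl (by simpa [pvRelaxA] using h)
  | cons e es ih =>
    simp only [pvRelaxA, List.foldl_cons] at h
    rcases ih (st := _) h with h' | h'
    · rcases pvRelaxA_step_pq d vis st e h' with h2 | h2
      · exact Or.inl h2
      · right
        rw [List.map_cons]
        exact List.mem_cons.mpr (Or.inl h2)
    · right
      rw [List.map_cons]
      exact List.mem_cons.mpr (Or.inr h')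

theorem pvNodes_getD {g : PySem.Dict Int (List (Int × Int))} {u : Int} {e : Int × Int}
    (h : e ∈ g.getD u []) : e.1 ∈ pvNodes g := by
  rw [PySem.Dict.getD_eq_get?_getD] at h
  cases hg : g.get? u with
  | none => rw [hg] at h; simp at h
  | some l =>
    rw [hg] at h
    simp only [Option.getD_some] at h
    have hit := PySem.Dict.mem_items_of_get?_eq_some (d := g) hg
    simp only [pvNodes, List.mem_toFinset, List.mem_flatMap]
    refine ⟨(u, l), hit, ?_⟩
    simp only [List.mem_cons, List.mem_map]
    exact Or.inr ⟨e, h, rfl⟩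

-- the `while priority_queue:` loop of dijkstra
def pvDLoop (N : Int) (g : PySem.Dict Int (List (Int × Int))) (dist : PySem.Dict Int Int)
    (vis : PySem.Set Int) (pq : List (Int × Int)) : Int :=
  match hp : pvPopMin pq with
  | none => -1
  | some (m, rest) =>
    if PySem.Set.contains vis m.2 then pvDLoop N g dist vis rest
    else
      let vis' := PySem.Set.add vis m.2
      if m.2 == N - 1 then m.1
      else
        let st := pvRelaxA m.1 vis' (dist, rest) (g.getD m.2 [])
        pvDLoop N g st.1 vis' st.2
termination_by ((((pvNodes g ∪ pvPqNodes pq) \ vis.toFinset).card, pq.length) : Nat × Nat)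
decreasing_by
  · -- skip case: queue shrinks, unfinished set does not grow
    have hrest := pvPopMin_rest hp
    have hmem := pvPopMin_mem hp
    have hsub : pvPqNodes rest ⊆ pvPqNodes pq := by
      subst hrest
      intro x hx
      simp only [pvPqNodes, List.mem_toFinset, List.mem_map] at hx ⊢
      rcases hx with ⟨q, hq, hqx⟩
      exact ⟨q, (pq.erase_subset) hq, hqx⟩
    have hcard : (((pvNodes g ∪ pvPqNodes rest) \ vis.toFinset).card) ≤
        (((pvNodes g ∪ pvPqNodes pq) \ vis.toFinset).card) := by
      apply Finset.card_le_card
      intro x hx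
      simp only [Finset.mem_sdiff, Finset.mem_union] at hx ⊢
      rcases hx with ⟨hx1 | hx1, hx2⟩
      · exact ⟨Or.inl hx1, hx2⟩
      · exact ⟨Or.inr (hsub hx1), hx2⟩
    have hlen : rest.length < pq.length := by
      subst hrest
      have := List.length_erase_of_mem hmem
      have hpos : 0 < pq.length := List.length_pos_of_mem hmem
      omega
    rcases lt_or_eq_of_le hcard with h | h
    · exact Prod.Lex.left _ _ h
    · rw [h]; exact Prod.Lex.right _ hlen
  · -- visit case: one more node becomes finished
    rename_i hvis _
    have hrest := pvPopMin_rest hp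
    have hmem := pvPopMin_mem hp
    apply Prod.Lex.left
    apply Finset.card_lt_card
    constructor
    · intro x hx
      simp only [Finset.mem_sdiff, Finset.mem_union] at hx ⊢
      rcases hx with ⟨hx1, hx2⟩
      have hx2' : x ∉ vis.toFinset := by
        intro hc
        apply hx2
        simp only [List.mem_toFinset] at hc ⊢
        simp only [PySem.Set.mem_add]
        exact Or.inl hc
      refine ⟨?_, hx2'⟩
      rcases hx1 with hx1 | hx1
      · exact Or.inl hx1
      · simp only [pvPqNodes, List.mem_toFinset, List.mem_map] at hx1
        rcases hx1 with ⟨q, hq, hqx⟩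
        rcases pvRelaxA_pq_mem hq with hq' | hq'
        · right
          simp only [pvPqNodes, List.mem_toFinset, List.mem_map]
          subst hrest
          exact ⟨q, (pq.erase_subset) hq', hqx⟩
        · left
          rw [← hqx]
          simp only [List.mem_map] at hq'
          rcases hq' with ⟨e, he, hex⟩
          rw [← hex]
          exact pvNodes_getD he
    · intro hsub
      have hm2 : m.2 ∈ (pvNodes g ∪ pvPqNodes pq) \ vis.toFinset := by
        simp only [Finset.mem_sdiff, Finset.mem_union]
        refine ⟨Or.inr ?_, ?_⟩
        · simp only [pvPqNodes, List.mem_toFinset, List.mem_map]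
          exact ⟨m, hmem, rfl⟩
        · simp only [List.mem_toFinset]
          intro hc
          rw [PySem.Set.contains_iff] at hvis
          exact hvis hc
      have := hsub hm2
      simp only [Finset.mem_sdiff, List.mem_toFinset] at this
      exact this.2 (by
        rw [PySem.Set.add_eq_ite]
        split <;> simp_all)

-- `graph = defaultdict(list)` with `graph[i].append(edge)` = Dict.modify i [] (· ++ [edge])
def pvBuildGraph (N : Int) (squares : List Int) : PySem.Dict Int (List (Int × Int)) :=
  (PySem.List.pyRange 0 N 1).foldl (fun g i =>
    if PySem.List.pyGetD squares i 0 == 0 then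
      (PySem.List.pyRange 1 7 1).foldl (fun g2 j =>
        if i + j < N then g2.modify i [] (· ++ [(i + j, (1 : Int))])
        else g2.modify i [] (· ++ [(N - 1, (1 : Int))])) g
    else
      let ns := i + PySem.List.pyGetD squares i 0
      if 0 ≤ ns ∧ ns < N then g.modify i [] (· ++ [(ns, (0 : Int))])
      else g.modify i [] (· ++ [(N - 1, (0 : Int))])) PySem.Dict.empty

def minimum_dice_rolls_to_goal (N : Int) (squares : List Int) : Int :=
  let graph := pvBuildGraph N squares
  pvDLoop N graph ((PySem.Dict.empty : PySem.Dict Int Int).insert 0 0) PySem.Set.empty [(0, 0)]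

-- ===== PORT B =====
-- (distances are sums of the 0/1 edge weights starting from 0, hence carried as Nat; None = unreached)
def pvRelaxB (st : List (Option Nat) × Bool) (e : Int × Int × Nat) : List (Option Nat) × Bool :=
  match PySem.List.pyGetD st.1 e.1 none with
  | none => st
  | some du =>
    match PySem.List.pyGetD st.1 e.2.1 none with
    | none => (PySem.List.pySetD st.1 e.2.1 (some (du + e.2.2)), true)
    | some dv =>
      if du + e.2.2 < dv then (PySem.List.pySetD st.1 e.2.1 (some (du + e.2.2)), true) else st

def pvRound (edges : List (Int × Int × Nat)) (dist : List (Option Nat)) :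
    List (Option Nat) × Bool :=
  edges.foldl pvRelaxB (dist, false)

-- termination measure for the `while changed:` loop
def pvNoneCount (dist : List (Option Nat)) : Nat := dist.countP (·.isNone)
def pvSumV (dist : List (Option Nat)) : Nat := (dist.map (fun o => o.getD 0)).sum

theorem pvRelaxB_length (st : List (Option Nat) × Bool) (e : Int × Int × Nat) :
    (pvRelaxB st e).1.length = st.1.length := by
  unfold pvRelaxB
  split
  · rfl
  · split
    · simp [PySem.List.length_pySetD]
    · split
      · simp [PySem.List.length_pySetD]
      · rfl

theorem pvFoldB_length (edges : List (Int × Int × Nat)) (st : List (Option Nat) × Bool) :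
    (edges.foldl pvRelaxB st).1.length = st.1.length := by
  induction edges generalizing st with
  | nil => rfl
  | cons e es ih => rw [List.foldl_cons, ih, pvRelaxB_length]

theorem pvRound_length (edges : List (Int × Int × Nat)) (dist : List (Option Nat)) (c : Bool) :
    (edges.foldl pvRelaxB (dist, c)).1.length = dist.length :=
  pvFoldB_length edges (dist, c)

theorem pvSplitAt (dist : List (Option Nat)) (n : Nat) (h : n < dist.length) :
    dist = dist.take n ++ dist[n] :: dist.drop (n + 1) := by
  conv_lhs => rw [← List.take_append_drop n dist]
  congr 1
  exact List.drop_eq_getElem_cons h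

theorem pvNC_set_none {dist : List (Option Nat)} {n : Nat} (h : n < dist.length)
    (hn : dist[n] = none) (m : Nat) :
    pvNoneCount (dist.set n (some m)) + 1 = pvNoneCount dist := by
  rw [List.set_eq_take_cons_drop _ h]
  conv_rhs => rw [pvSplitAt dist n h]
  simp [pvNoneCount, List.countP_append, hn]
  omega

theorem pvNC_set_some {dist : List (Option Nat)} {n : Nat} {dv : Nat} (h : n < dist.length)
    (hn : dist[n] = some dv) (m : Nat) :
    pvNoneCount (dist.set n (some m)) = pvNoneCount dist := by
  rw [List.set_eq_take_cons_drop _ h]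
  conv_rhs => rw [pvSplitAt dist n h]
  simp [pvNoneCount, List.countP_append, hn]

theorem pvSV_set_some {dist : List (Option Nat)} {n : Nat} {dv : Nat} (h : n < dist.length)
    (hn : dist[n] = some dv) (m : Nat) :
    pvSumV (dist.set n (some m)) + dv = pvSumV dist + m := by
  rw [List.set_eq_take_cons_drop _ h]
  conv_rhs => rw [pvSplitAt dist n h]
  simp [pvSumV, hn]
  omega

theorem pvDget_eq_getElem {dist : List (Option Nat)} {i : Int} (h0 : 0 ≤ i)
    (h1 : i < (dist.length : Int)) :
    PySem.List.pyGetD dist i none = dist[i.toNat]'(by omega) := by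
  exact PySem.List.pyGetD_eq_getElem dist none h0 h1

theorem pvStep_dec (st : List (Option Nat) × Bool) (e : Int × Int × Nat)
    (hwf : 0 ≤ e.2.1 ∧ e.2.1 < (st.1.length : Int)) :
    pvRelaxB st e = st ∨
    ((pvNoneCount (pvRelaxB st e).1 < pvNoneCount st.1 ∨
      (pvNoneCount (pvRelaxB st e).1 = pvNoneCount st.1 ∧
       pvSumV (pvRelaxB st e).1 < pvSumV st.1)) ∧ (pvRelaxB st e).2 = true) := by
  have hn : e.2.1.toNat < st.1.length := by omega
  unfold pvRelaxB
  cases hu : PySem.List.pyGetD st.1 e.1 none with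
  | none => exact Or.inl rfl
  | some du =>
    cases hv : PySem.List.pyGetD st.1 e.2.1 none with
    | none =>
      dsimp only
      right
      rw [pvDget_eq_getElem hwf.1 hwf.2] at hv
      constructor
      · left
        simp only [PySem.List.pySetD_of_nonneg st.1 _ hwf.1]
        have := pvNC_set_none hn hv (du + e.2.2)
        omega
      · rfl
    | some dv =>
      dsimp only
      by_cases hlt : du + e.2.2 < dv
      · right
        rw [pvDget_eq_getElem hwf.1 hwf.2] at hv
        rw [if_pos hlt]
        constructor
        · right
          simp only [PySem.List.pySetD_of_nonneg st.1 _ hwf.1]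
          exact ⟨pvNC_set_some hn hv _, by have := pvSV_set_some hn hv (du + e.2.2); omega⟩
        · rfl
      · rw [if_neg hlt]
        exact Or.inl rfl

theorem pvFoldB_dec (edges : List (Int × Int × Nat)) (st : List (Option Nat) × Bool)
    (hwf : ∀ e ∈ edges, 0 ≤ e.2.1 ∧ e.2.1 < (st.1.length : Int)) :
    edges.foldl pvRelaxB st = st ∨
    ((pvNoneCount (edges.foldl pvRelaxB st).1 < pvNoneCount st.1 ∨
      (pvNoneCount (edges.foldl pvRelaxB st).1 = pvNoneCount st.1 ∧
       pvSumV (edges.foldl pvRelaxB st).1 < pvSumV st.1)) ∧ (edges.foldl pvRelaxB st).2 = true) := by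
  induction edges generalizing st with
  | nil => exact Or.inl rfl
  | cons e es ih =>
    rw [List.foldl_cons]
    have hlen := pvRelaxB_length st e
    have hwf' : ∀ e' ∈ es, 0 ≤ e'.2.1 ∧ e'.2.1 < (((pvRelaxB st e).1.length : Nat) : Int) := by
      intro e' he'
      rw [hlen]
      exact hwf e' (List.mem_cons.mpr (Or.inr he'))
    rcases pvStep_dec st e (hwf e (List.mem_cons.mpr (Or.inl rfl))) with h | h
    · rw [h]
      exact ih st (fun e' he' => hwf e' (List.mem_cons.mpr (Or.inr he')))
    · rcases ih (pvRelaxB st e) hwf' with h2 | h2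
      · rw [h2]
        exact Or.inr h
      · right
        refine ⟨?_, h2.2⟩
        rcases h.1 with ha | ha <;> rcases h2.1 with hb | hb <;> omega

theorem pvRound_progress (edges : List (Int × Int × Nat)) (dist : List (Option Nat)) (c : Bool)
    (hwf : ∀ e ∈ edges, 0 ≤ e.2.1 ∧ e.2.1 < (dist.length : Int)) :
    ((edges.foldl pvRelaxB (dist, c)).1 = dist ∧ (edges.foldl pvRelaxB (dist, c)).2 = c) ∨
    (pvNoneCount (edges.foldl pvRelaxB (dist, c)).1 < pvNoneCount dist ∨
      (pvNoneCount (edges.foldl pvRelaxB (dist, c)).1 = pvNoneCount dist ∧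
       pvSumV (edges.foldl pvRelaxB (dist, c)).1 < pvSumV dist)) := by
  rcases pvFoldB_dec edges (dist, c) hwf with h | h
  · rw [h]
    exact Or.inl ⟨rfl, rfl⟩
  · exact Or.inr h.1

def pvBfLoop (edges : List (Int × Int × Nat)) (dist : List (Option Nat))
    (hwf : ∀ e ∈ edges, 0 ≤ e.2.1 ∧ e.2.1 < (dist.length : Int)) : List (Option Nat) :=
  if h : (pvRound edges dist).2 = true then
    pvBfLoop edges (pvRound edges dist).1 (by
      intro e he
      have h1 := hwf e he
      have h2 := pvRound_length edges dist false
      rw [show edges.foldl pvRelaxB (dist, false) = pvRound edges dist from rfl] at h2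
      rw [h2]
      exact h1)
  else (pvRound edges dist).1
termination_by ((pvNoneCount dist, pvSumV dist) : Nat × Nat)
decreasing_by
  have hp := pvRound_progress edges dist false hwf
  rw [show edges.foldl pvRelaxB (dist, false) = pvRound edges dist from rfl] at hp
  rcases hp with ⟨-, h2⟩ | hp
  · simp_all
  · rcases hp with hp | hp
    · exact Prod.Lex.left _ _ hp
    · rw [hp.1]; exact Prod.Lex.right _ hp.2

def pvEdgesB (N : Int) (squares : List Int) : List (Int × Int × Nat) :=
  (PySem.List.pyRange 0 N 1).foldl (fun es i =>
    if PySem.List.pyGetD squares i 0 == 0 then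
      (PySem.List.pyRange 1 7 1).foldl (fun es2 j =>
        es2 ++ [(i, if i + j < N then i + j else N - 1, (1 : Nat))]) es
    else
      let t := i + PySem.List.pyGetD squares i 0
      es ++ [(i, if 0 ≤ t ∧ t < N then t else N - 1, (0 : Nat))]) []

theorem pvEdgesB_eq (N : Int) (squares : List Int) :
    pvEdgesB N squares = (PySem.List.pyRange 0 N 1).flatMap (fun i =>
      if PySem.List.pyGetD squares i 0 == 0 then
        (PySem.List.pyRange 1 7 1).map (fun j => (i, if i + j < N then i + j else N - 1, (1 : Nat)))
      else
        [(i, if 0 ≤ i + PySem.List.pyGetD squares i 0 ∧ i + PySem.List.pyGetD squares i 0 < N then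
              i + PySem.List.pyGetD squares i 0 else N - 1, (0 : Nat))]) := by
  unfold pvEdgesB
  have hcongr := PySem.List.foldl_congr_mem
    (l := PySem.List.pyRange 0 N 1) (init := ([] : List (Int × Int × Nat)))
    (f := fun es i =>
      if PySem.List.pyGetD squares i 0 == 0 then
        (PySem.List.pyRange 1 7 1).foldl (fun es2 j =>
          es2 ++ [(i, if i + j < N then i + j else N - 1, (1 : Nat))]) es
      else
        let t := i + PySem.List.pyGetD squares i 0
        es ++ [(i, if 0 ≤ t ∧ t < N then t else N - 1, (0 : Nat))])
    (g := fun es i => es ++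
      (if PySem.List.pyGetD squares i 0 == 0 then
        (PySem.List.pyRange 1 7 1).map (fun j => (i, if i + j < N then i + j else N - 1, (1 : Nat)))
      else
        [(i, if 0 ≤ i + PySem.List.pyGetD squares i 0 ∧ i + PySem.List.pyGetD squares i 0 < N then
              i + PySem.List.pyGetD squares i 0 else N - 1, (0 : Nat))]))
    (by
      intro acc i _
      by_cases hz : (PySem.List.pyGetD squares i 0 == 0) = true
      · simp only [hz, if_true]
        exact PySem.List.foldl_append_singleton_eq_map _ _ _
      · rw [Bool.not_eq_true] at hz
        simp only [hz, Bool.false_eq_true, if_false])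
  rw [hcongr, PySem.List.foldl_append_eq_flatMap]
  rfl

theorem pvEdgesB_wf (N : Int) (squares : List Int) (hN : 0 < N) :
    ∀ e ∈ pvEdgesB N squares, 0 ≤ e.2.1 ∧ e.2.1 < N := by
  rw [pvEdgesB_eq]
  intro e he
  rw [List.mem_flatMap] at he
  obtain ⟨i, hi, he⟩ := he
  rw [PySem.List.mem_pyRange_one] at hi
  split at he
  · rw [List.mem_map] at he
    obtain ⟨j, hj, rfl⟩ := he
    rw [PySem.List.mem_pyRange_one] at hj
    dsimp only
    split <;> omega
  · rw [List.mem_singleton] at he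
    subst he
    dsimp only
    split <;> omega

def minimum_dice_rolls_to_goal_alt (N : Int) (squares : List Int) : Int :=
  if hN : N ≤ 0 then -1
  else
    let edges := pvEdgesB N squares
    let dist0 := PySem.List.pySetD (List.replicate N.toNat (none : Option Nat)) 0 (some 0)
    let distF := pvBfLoop edges dist0 (by
      intro e he
      have h := pvEdgesB_wf N squares (by omega) e he
      have hl : (dist0 : List (Option Nat)).length = N.toNat := by
        simp [dist0, PySem.List.length_pySetD]
      rw [hl]
      omega)
    match PySem.List.pyGetD distF (N - 1) none with
    | some m => (m : Int)
    | none => -1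

-- ===== PRECONDITION & SPEC =====
-- Pre_ excludes exactly the inputs where A raises IndexError: N larger than len(squares)
-- (both programs index squares[i] for i in range(N)).
def Pre_minimum_dice_rolls_to_goal (N : Int) (squares : List Int) : Prop :=
  N ≤ (squares.length : Int)
instance (N : Int) (squares : List Int) : Decidable (Pre_minimum_dice_rolls_to_goal N squares) := by
  unfold Pre_minimum_dice_rolls_to_goal; infer_instance

def pvWitness_minimum_dice_rolls_to_goal : Int × List Int := (3, [0, 2, 0])

def Spec_minimum_dice_rolls_to_goal (N : Int) (squares : List Int) (out : Int) : Prop :=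
  out = minimum_dice_rolls_to_goal_alt N squares
instance (N : Int) (squares : List Int) (out : Int) :
    Decidable (Spec_minimum_dice_rolls_to_goal N squares out) := by
  unfold Spec_minimum_dice_rolls_to_goal; infer_instance

-- ===== CLAIM (what is proved, stated in full; the proofs are below) =====
def Claim_equal_minimum_dice_rolls_to_goal : Prop :=
  ∀ (N : Int) (squares : List Int), Dom_minimum_dice_rolls_to_goal N squares →
    Pre_minimum_dice_rolls_to_goal N squares →
    Spec_minimum_dice_rolls_to_goal N squares (minimum_dice_rolls_to_goal N squares)

-- ===== LEMMAS AND PROOFS =====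

theorem pvPopMin_eq_none {pq : List (Int × Int)} (h : pvPopMin pq = none) : pq = [] := by
  cases pq with
  | nil => rfl
  | cons p rest => simp [pvPopMin] at h


theorem pvFoldMin_le (rest : List (Int × Int)) (p : Int × Int) :
    (pvFoldMin p rest).1 ≤ p.1 ∧ ∀ x ∈ rest, (pvFoldMin p rest).1 ≤ x.1 := by
  induction rest generalizing p with
  | nil => simp [pvFoldMin]
  | cons x xs ih =>
    simp only [pvFoldMin, List.foldl_cons]
    have h := ih (if pvPairLt x p then x else p)
    rw [pvFoldMin] at h
    constructor
    · refine le_trans h.1 ?_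
      by_cases hb : pvPairLt x p = true
      · simp only [hb, if_true]
        simp only [pvPairLt, Bool.or_eq_true, decide_eq_true_eq, Bool.and_eq_true, beq_iff_eq] at hb
        omega
      · simp [hb]
    · intro y hy
      rcases List.mem_cons.mp hy with hy | hy
      · subst hy
        refine le_trans h.1 ?_
        by_cases hb : pvPairLt y p = true
        · simp [hb]
        · have hb' : (if pvPairLt y p = true then y else p) = p := by simp [hb]
          rw [hb']
          have hb1 : ¬(y.1 < p.1) := fun hlt => hb (by simp [pvPairLt, hlt])
          omega
      · exact h.2 y hy


theorem pvPopMin_min {pq : List (Int × Int)} {m : Int × Int} {r : List (Int × Int)}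
    (h : pvPopMin pq = some (m, r)) : ∀ p ∈ pq, m.1 ≤ p.1 := by
  cases pq with
  | nil => simp [pvPopMin] at h
  | cons p rest =>
    simp only [pvPopMin, Option.some.injEq, Prod.mk.injEq] at h
    rcases h with ⟨h1, -⟩
    intro q hq
    have := pvFoldMin_le rest p
    rw [h1] at this
    rcases List.mem_cons.mp hq with hq | hq
    · subst hq; exact this.1
    · exact this.2 q hq



-- the board graph, node by node: the per-node successor list both programs build
def pvSuccs (N : Int) (squares : List Int) (u : Int) : List (Int × Nat) :=
  if 0 ≤ u ∧ u < N then
    if PySem.List.pyGetD squares u 0 == 0 then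
      (PySem.List.pyRange 1 7 1).map (fun j => (if u + j < N then u + j else N - 1, (1 : Nat)))
    else
      [(if 0 ≤ u + PySem.List.pyGetD squares u 0 ∧ u + PySem.List.pyGetD squares u 0 < N then
          u + PySem.List.pyGetD squares u 0 else N - 1, (0 : Nat))]
  else []

-- walks from square 0 with their total dice-roll cost
inductive pvReach (N : Int) (squares : List Int) : Nat → Int → Prop
  | zero : pvReach N squares 0 0
  | step {k : Nat} {u v : Int} {w : Nat} :
      pvReach N squares k u → (v, w) ∈ pvSuccs N squares u → pvReach N squares (k + w) v

noncomputable def pvSpecOut (N : Int) (squares : List Int) : Int :=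
  letI : DecidablePred (fun k => pvReach N squares k (N - 1)) := fun _ => Classical.propDecidable _
  letI : Decidable (∃ k, pvReach N squares k (N - 1)) := Classical.propDecidable _
  if h : ∃ k, pvReach N squares k (N - 1) then ((Nat.find h : Nat) : Int) else -1

-- the Dijkstra loop invariant
def pvINV (N : Int) (squares : List Int) (dist : PySem.Dict Int Int) (vis : PySem.Set Int)
    (pq : List (Int × Int)) : Prop :=
  (∀ p ∈ pq, 0 ≤ p.1 ∧ pvReach N squares p.1.toNat p.2) ∧
  (∀ x dx, dist.get? x = some dx → 0 ≤ dx ∧ pvReach N squares dx.toNat x) ∧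
  (∀ x ∈ vis, ∃ dx, dist.get? x = some dx ∧ ∀ k : Nat, pvReach N squares k x → dx ≤ (k : Int)) ∧
  (∀ x dx, x ∉ vis → dist.get? x = some dx → (dx, x) ∈ pq) ∧
  (∀ x ∈ vis, ∀ vw ∈ pvSuccs N squares x, (vw.1 ∈ vis) ∨
    ∃ dx dy, dist.get? x = some dx ∧ dist.get? vw.1 = some dy ∧ dy ≤ dx + (vw.2 : Int)) ∧
  (∀ p ∈ pq, ∃ dx, dist.get? p.2 = some dx ∧ dx ≤ p.1) ∧
  (dist.get? 0 = some 0) ∧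
  ((N - 1) ∉ vis)

-- every reachable unfinished node has a queue entry whose key bounds its distance
theorem pvKey {N : Int} {squares : List Int} {dist : PySem.Dict Int Int} {vis : PySem.Set Int}
    {pq : List (Int × Int)} (hinv : pvINV N squares dist vis pq) :
    ∀ (k : Nat) (v : Int), pvReach N squares k v → v ∉ vis → ∃ p ∈ pq, p.1 ≤ (k : Int) := by
  obtain ⟨hI1, hI2, hI3, hI4, hI5, hI6, hI7, hI8⟩ := hinv
  intro k v hR
  induction hR with
  | zero =>
    intro h0
    exact ⟨(0, 0), hI4 0 0 h0 hI7, by simp⟩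
  | @step k u v w hRk hsucc ih =>
    intro hv
    by_cases hu : u ∈ vis
    · rcases hI5 u hu (v, w) hsucc with hvin | ⟨dx, dy, hdx, hdy, hle⟩
      · exact absurd hvin hv
      · obtain ⟨dx', hdx', hmin⟩ := hI3 u hu
        have hxx : dx = dx' := by rw [hdx] at hdx'; exact Option.some.inj hdx'
        subst hxx
        refine ⟨(dy, v), hI4 v dy hv hdy, ?_⟩
        have := hmin k hRk
        dsimp only at hle ⊢
        push_cast
        omega
    · obtain ⟨p, hp, hple⟩ := ih hu
      refine ⟨p, hp, by push_cast; omega⟩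

-- what one pass of the neighbour-relaxation loop guarantees
def pvPost (N : Int) (squares : List Int) (d : Int) (vis' : PySem.Set Int)
    (dist : PySem.Dict Int Int) (L : List (Int × Int))
    (st : PySem.Dict Int Int × List (Int × Int)) : Prop :=
  (∀ p ∈ st.2, 0 ≤ p.1 ∧ pvReach N squares p.1.toNat p.2) ∧
  (∀ x dx, st.1.get? x = some dx → 0 ≤ dx ∧ pvReach N squares dx.toNat x) ∧
  (∀ x dx, x ∉ vis' → st.1.get? x = some dx → (dx, x) ∈ st.2) ∧
  (∀ p ∈ st.2, ∃ dx, st.1.get? p.2 = some dx ∧ dx ≤ p.1) ∧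
  (st.1.get? 0 = some 0) ∧
  (∀ x, x ∈ vis' → st.1.get? x = dist.get? x) ∧
  (∀ x dy, dist.get? x = some dy → ∃ dy', st.1.get? x = some dy' ∧ dy' ≤ dy) ∧
  (∀ e ∈ L, e.1 ∈ vis' ∨ ∃ dy, st.1.get? e.1 = some dy ∧ dy ≤ d + e.2)

theorem pvRelaxA_spec (N : Int) (squares : List Int) (d : Int) (u : Int) (vis' : PySem.Set Int)
    (hd0 : 0 ≤ d) (hRd : pvReach N squares d.toNat u) :
    ∀ (L : List (Int × Int)) (dist : PySem.Dict Int Int) (pq : List (Int × Int)),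
    (∀ e ∈ L, (e.1, e.2.toNat) ∈ pvSuccs N squares u ∧ 0 ≤ e.2) →
    (∀ p ∈ pq, 0 ≤ p.1 ∧ pvReach N squares p.1.toNat p.2) →
    (∀ x dx, dist.get? x = some dx → 0 ≤ dx ∧ pvReach N squares dx.toNat x) →
    (∀ x dx, x ∉ vis' → dist.get? x = some dx → (dx, x) ∈ pq) →
    (∀ p ∈ pq, ∃ dx, dist.get? p.2 = some dx ∧ dx ≤ p.1) →
    dist.get? 0 = some 0 →
    pvPost N squares d vis' dist L (pvRelaxA d vis' (dist, pq) L) := by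
  intro L
  induction L with
  | nil =>
    intro dist pq _ h1 h2 h4 h6 h7
    exact ⟨h1, h2, h4, h6, h7, fun x _ => rfl, fun x dy h => ⟨dy, h, le_refl _⟩, by simp⟩
  | cons e L ih =>
    intro dist pq hL h1 h2 h4 h6 h7
    have hLe := hL e (List.mem_cons.mpr (Or.inl rfl))
    have hLt : ∀ e' ∈ L, (e'.1, e'.2.toNat) ∈ pvSuccs N squares u ∧ 0 ≤ e'.2 :=
      fun e' he' => hL e' (List.mem_cons.mpr (Or.inr he'))
    by_cases hvise : PySem.Set.contains vis' e.1 = true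
    · have hstep : pvRelaxA d vis' (dist, pq) (e :: L) = pvRelaxA d vis' (dist, pq) L := by
        unfold pvRelaxA
        rw [List.foldl_cons, if_pos hvise]
      rw [hstep]
      obtain ⟨c1, c2, c3, c4, c5, c6, c7, c8⟩ := ih dist pq hLt h1 h2 h4 h6 h7
      refine ⟨c1, c2, c3, c4, c5, c6, c7, ?_⟩
      intro e' he'
      rcases List.mem_cons.mp he' with he' | he'
      · subst he'
        exact Or.inl ((PySem.Set.contains_iff _ _).mp hvise)
      · exact c8 e' he'
    · have hnv : e.1 ∉ vis' := fun hc => hvise ((PySem.Set.contains_iff _ _).mpr hc)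
      by_cases hlt : pvLtInf (d + e.2) (dist.get? e.1) = true
      · -- relaxation fires: dist[e.1] := d + w, (d + w, e.1) pushed
        have hstep : pvRelaxA d vis' (dist, pq) (e :: L) =
            pvRelaxA d vis' (dist.insert e.1 (d + e.2), (d + e.2, e.1) :: pq) L := by
          unfold pvRelaxA
          rw [List.foldl_cons, if_neg hvise, if_pos hlt]
        rw [hstep]
        have hnd0 : 0 ≤ d + e.2 := by
          have := hLe.2
          omega
        have hRnd : pvReach N squares (d + e.2).toNat e.1 := by
          have harith : (d + e.2).toNat = d.toNat + e.2.toNat := by omega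
          rw [harith]
          exact pvReach.step hRd hLe.1
        have j1 : ∀ p ∈ (d + e.2, e.1) :: pq, 0 ≤ p.1 ∧ pvReach N squares p.1.toNat p.2 := by
          intro p hp
          rcases List.mem_cons.mp hp with hp | hp
          · subst hp; exact ⟨hnd0, hRnd⟩
          · exact h1 p hp
        have j2 : ∀ x dx, (dist.insert e.1 (d + e.2)).get? x = some dx →
            0 ≤ dx ∧ pvReach N squares dx.toNat x := by
          intro x dx hx
          rw [PySem.Dict.get?_insert] at hx
          split at hx
          · rename_i hxe
            subst hxe
            have := Option.some.inj hx
            subst this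
            exact ⟨hnd0, hRnd⟩
          · exact h2 x dx hx
        have j4 : ∀ x dx, x ∉ vis' → (dist.insert e.1 (d + e.2)).get? x = some dx →
            (dx, x) ∈ (d + e.2, e.1) :: pq := by
          intro x dx hx hgx
          rw [PySem.Dict.get?_insert] at hgx
          split at hgx
          · rename_i hxe
            subst hxe
            have := Option.some.inj hgx
            subst this
            exact List.mem_cons.mpr (Or.inl rfl)
          · exact List.mem_cons.mpr (Or.inr (h4 x dx hx hgx))
        have j6 : ∀ p ∈ (d + e.2, e.1) :: pq,
            ∃ dx, (dist.insert e.1 (d + e.2)).get? p.2 = some dx ∧ dx ≤ p.1 := by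
          intro p hp
          rcases List.mem_cons.mp hp with hp | hp
          · subst hp
            exact ⟨d + e.2, by rw [PySem.Dict.get?_insert, if_pos rfl], le_refl _⟩
          · obtain ⟨dx, hdx, hdxle⟩ := h6 p hp
            rw [PySem.Dict.get?_insert]
            by_cases hpe : p.2 = e.1
            · rw [if_pos hpe]
              refine ⟨d + e.2, rfl, ?_⟩
              rw [hpe] at hdx
              unfold pvLtInf at hlt
              rw [hdx] at hlt
              simp only [decide_eq_true_eq] at hlt
              omega
            · rw [if_neg hpe]
              exact ⟨dx, hdx, hdxle⟩
        have j7 : (dist.insert e.1 (d + e.2)).get? 0 = some 0 := by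
          rw [PySem.Dict.get?_insert]
          by_cases h0e : (0 : Int) = e.1
          · exfalso
            unfold pvLtInf at hlt
            rw [← h0e, h7] at hlt
            simp only [decide_eq_true_eq] at hlt
            omega
          · rw [if_neg h0e]
            exact h7
        obtain ⟨c1, c2, c3, c4, c5, c6, c7, c8⟩ := ih _ _ hLt j1 j2 j4 j6 j7
        refine ⟨c1, c2, c3, c4, c5, ?_, ?_, ?_⟩
        · intro x hx
          rw [c6 x hx, PySem.Dict.get?_insert, if_neg (by rintro rfl; exact hnv hx)]
        · intro x dy hdy
          by_cases hxe : x = e.1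
          · subst hxe
            unfold pvLtInf at hlt
            rw [hdy] at hlt
            simp only [decide_eq_true_eq] at hlt
            obtain ⟨dy', hdy', hdy'le⟩ := c7 e.1 (d + e.2)
              (by rw [PySem.Dict.get?_insert, if_pos rfl])
            exact ⟨dy', hdy', by omega⟩
          · obtain ⟨dy', hdy', hdy'le⟩ := c7 x dy
              (by rw [PySem.Dict.get?_insert, if_neg hxe]; exact hdy)
            exact ⟨dy', hdy', hdy'le⟩
        · intro e' he'
          rcases List.mem_cons.mp he' with he' | he'
          · subst he'
            right
            obtain ⟨dy', hdy', hdy'le⟩ := c7 e'.1 (d + e'.2)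
              (by rw [PySem.Dict.get?_insert, if_pos rfl])
            exact ⟨dy', hdy', hdy'le⟩
          · exact c8 e' he'
      · -- neighbour already at least as close: state unchanged
        have hstep : pvRelaxA d vis' (dist, pq) (e :: L) = pvRelaxA d vis' (dist, pq) L := by
          unfold pvRelaxA
          rw [List.foldl_cons, if_neg hvise, if_neg hlt]
        rw [hstep]
        obtain ⟨c1, c2, c3, c4, c5, c6, c7, c8⟩ := ih dist pq hLt h1 h2 h4 h6 h7
        refine ⟨c1, c2, c3, c4, c5, c6, c7, ?_⟩
        intro e' he'
        rcases List.mem_cons.mp he' with he' | he'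
        · subst he'
          right
          unfold pvLtInf at hlt
          cases hv : dist.get? e'.1 with
          | none => rw [hv] at hlt; simp at hlt
          | some dv =>
            rw [hv] at hlt
            simp only [decide_eq_true_eq] at hlt
            obtain ⟨dy', hdy', hdy'le⟩ := c7 e'.1 dv hv
            exact ⟨dy', hdy', by omega⟩
        · exact c8 e' he'

theorem pvSuccs_bounds {N : Int} {squares : List Int} {u v : Int} {w : Nat}
    (h : (v, w) ∈ pvSuccs N squares u) :
    0 ≤ u ∧ u < N ∧ 0 ≤ v ∧ v < N ∧ w ≤ 1 := by
  unfold pvSuccs at h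
  by_cases hu : 0 ≤ u ∧ u < N
  · rw [if_pos hu] at h
    refine ⟨hu.1, hu.2, ?_⟩
    split at h
    · rw [List.mem_map] at h
      obtain ⟨j, hj, hjv⟩ := h
      rw [PySem.List.mem_pyRange_one] at hj
      have h1 : (if u + j < N then u + j else N - 1) = v := congrArg Prod.fst hjv
      have h2 : w = 1 := (congrArg Prod.snd hjv).symm
      subst h2
      refine ⟨?_, ?_, le_refl 1⟩ <;> (rw [← h1]; split <;> omega)
    · rw [List.mem_singleton] at h
      have h1 := congrArg Prod.fst h
      have h2 := (congrArg Prod.snd h).symm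
      dsimp only at h1 h2
      subst h2
      refine ⟨?_, ?_, by omega⟩ <;> (rw [h1]; split <;> omega)
  · rw [if_neg hu] at h
    simp at h

theorem pvMem_edgesB {N : Int} {squares : List Int} {e : Int × Int × Nat} :
    e ∈ pvEdgesB N squares ↔ (e.2.1, e.2.2) ∈ pvSuccs N squares e.1 := by
  rw [pvEdgesB_eq, List.mem_flatMap]
  constructor
  · rintro ⟨i, hi, he⟩
    rw [PySem.List.mem_pyRange_one] at hi
    unfold pvSuccs
    split at he
    · rw [List.mem_map] at he
      obtain ⟨j, hj, rfl⟩ := he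
      dsimp only
      rw [if_pos (by omega)]
      rw [if_pos (by assumption)]
      rw [List.mem_map]
      exact ⟨j, hj, rfl⟩
    · rw [List.mem_singleton] at he
      subst he
      dsimp only
      rw [if_pos (by omega)]
      rw [if_neg (by assumption)]
      simp
  · intro h
    have hb := pvSuccs_bounds h
    refine ⟨e.1, PySem.List.mem_pyRange_one.mpr ⟨hb.1, hb.2.1⟩, ?_⟩
    unfold pvSuccs at h
    rw [if_pos ⟨hb.1, hb.2.1⟩] at h
    split at h
    · rw [if_pos (by assumption)]
      rw [List.mem_map] at h ⊢
      obtain ⟨j, hj, hjv⟩ := h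
      exact ⟨j, hj, by
        rw [Prod.ext_iff] at hjv
        obtain ⟨h1, h2⟩ := hjv
        dsimp only at h1 h2 ⊢
        rw [h1, h2]⟩
    · rw [if_neg (by assumption)]
      rw [List.mem_singleton] at h ⊢
      rw [Prod.ext_iff] at h
      obtain ⟨h1, h2⟩ := h
      dsimp only at h1 h2
      rw [Prod.ext_iff]
      exact ⟨rfl, by rw [Prod.ext_iff]; exact ⟨h1, h2⟩⟩

theorem pvDget_set {dist : List (Option Nat)} {v x : Int} (hv0 : 0 ≤ v)
    (hv1 : v < (dist.length : Int)) (hx0 : 0 ≤ x) (hx1 : x < (dist.length : Int))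
    (val : Option Nat) :
    PySem.List.pyGetD (PySem.List.pySetD dist v val) x none =
      if x = v then val else PySem.List.pyGetD dist x none := by
  rw [PySem.List.pySetD_of_nonneg dist val hv0]
  have hx1' : x.toNat < (dist.set v.toNat val).length := by
    rw [List.length_set]; omega
  rw [PySem.List.pyGetD_eq_getElem _ none hx0 (by rw [List.length_set] at hx1' ⊢; exact_mod_cast hx1)]
  rw [PySem.List.pyGetD_eq_getElem dist none hx0 (by exact_mod_cast hx1)]
  rw [List.getElem_set]
  by_cases hxy : x = v
  · rw [if_pos (by omega), if_pos hxy]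
  · rw [if_neg (by omega), if_neg hxy]

-- invariant carried through B's relaxation loop
def pvPB (N : Int) (squares : List Int) (dist : List (Option Nat)) : Prop :=
  dist.length = N.toNat ∧
  PySem.List.pyGetD dist 0 none = some 0 ∧
  (∀ (u : Int) (m : Nat), 0 ≤ u → u < N → PySem.List.pyGetD dist u none = some m →
    pvReach N squares m u)

theorem pvPB_step {N : Int} {squares : List Int} {st : List (Option Nat) × Bool}
    {e : Int × Int × Nat} (hN : 1 ≤ N)
    (he : (e.2.1, e.2.2) ∈ pvSuccs N squares e.1) (hpb : pvPB N squares st.1) :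
    pvPB N squares (pvRelaxB st e).1 := by
  obtain ⟨hlen, hzero, hsound⟩ := hpb
  have hb := pvSuccs_bounds he
  have hlenN : (st.1.length : Int) = N := by rw [hlen]; omega
  unfold pvRelaxB
  cases hu : PySem.List.pyGetD st.1 e.1 none with
  | none => exact ⟨hlen, hzero, hsound⟩
  | some du =>
    have hRe : pvReach N squares du e.1 := hsound e.1 du hb.1 (by omega) hu
    have hset : ∀ _ : (PySem.List.pyGetD st.1 e.2.1 none = none ∨
        ∃ dv, PySem.List.pyGetD st.1 e.2.1 none = some dv ∧ du + e.2.2 < dv),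
        pvPB N squares (PySem.List.pySetD st.1 e.2.1 (some (du + e.2.2))) := by
      intro hupd
      refine ⟨by rw [PySem.List.length_pySetD]; exact hlen, ?_, ?_⟩
      · rw [pvDget_set hb.2.2.1 (by omega) (by omega) (by omega)]
        split
        · rename_i h0
          exfalso
          rw [← h0] at hupd
          rcases hupd with hupd | ⟨dv, hdv, hlt⟩
          · rw [hzero] at hupd; simp at hupd
          · rw [hzero] at hdv
            have : dv = 0 := (Option.some.inj hdv).symm
            omega
        · exact hzero
      · intro x m hx0 hx1 hgx
        rw [pvDget_set hb.2.2.1 (by omega) hx0 (by omega)] at hgx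
        split at hgx
        · rename_i hxv
          subst hxv
          have hm := Option.some.inj hgx
          subst hm
          exact pvReach.step hRe he
        · exact hsound x m hx0 hx1 hgx
    cases hv : PySem.List.pyGetD st.1 e.2.1 none with
    | none => exact hset (Or.inl hv)
    | some dv =>
      dsimp only
      split
      · rename_i hlt
        exact hset (Or.inr ⟨dv, hv, hlt⟩)
      · exact ⟨hlen, hzero, hsound⟩

theorem pvFoldB_pb {N : Int} {squares : List Int} (edges : List (Int × Int × Nat))
    (st : List (Option Nat) × Bool) (hN : 1 ≤ N)
    (hedge : ∀ e ∈ edges, (e.2.1, e.2.2) ∈ pvSuccs N squares e.1)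
    (hpb : pvPB N squares st.1) : pvPB N squares (edges.foldl pvRelaxB st).1 := by
  induction edges generalizing st with
  | nil => exact hpb
  | cons e es ih =>
    rw [List.foldl_cons]
    exact ih _ (fun e' he' => hedge e' (List.mem_cons.mpr (Or.inr he')))
      (pvPB_step hN (hedge e (List.mem_cons.mpr (Or.inl rfl))) hpb)

theorem pvBfLoop_pb {N : Int} {squares : List Int} (edges : List (Int × Int × Nat))
    (dist : List (Option Nat)) (hwf : ∀ e ∈ edges, 0 ≤ e.2.1 ∧ e.2.1 < (dist.length : Int))
    (hN : 1 ≤ N) (hedge : ∀ e ∈ edges, (e.2.1, e.2.2) ∈ pvSuccs N squares e.1)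
    (hpb : pvPB N squares dist) : pvPB N squares (pvBfLoop edges dist hwf) := by
  fun_induction pvBfLoop with
  | case1 dist hwf h ih =>
    exact ih (pvFoldB_pb edges (dist, false) hN hedge hpb)
  | case2 dist hwf h =>
    exact pvFoldB_pb edges (dist, false) hN hedge hpb

theorem pvFoldB_flag (edges : List (Int × Int × Nat)) (dist : List (Option Nat)) :
    (edges.foldl pvRelaxB (dist, true)).2 = true := by
  induction edges generalizing dist with
  | nil => rfl
  | cons e es ih =>
    rw [List.foldl_cons]
    unfold pvRelaxB
    dsimp only
    split
    · exact ih dist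
    · split
      · exact ih _
      · split
        · exact ih _
        · exact ih dist

theorem pvFix_edges (edges : List (Int × Int × Nat)) (dist : List (Option Nat))
    (h : edges.foldl pvRelaxB (dist, false) = (dist, false)) :
    ∀ e ∈ edges, ∀ du, PySem.List.pyGetD dist e.1 none = some du →
      ∃ dv, PySem.List.pyGetD dist e.2.1 none = some dv ∧ dv ≤ du + e.2.2 := by
  induction edges with
  | nil => intro e he; simp at he
  | cons e es ih =>
    rw [List.foldl_cons] at h
    have halt : pvRelaxB (dist, false) e = (dist, false) ∨ (pvRelaxB (dist, false) e).2 = true := by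
      unfold pvRelaxB
      dsimp only
      cases h1 : PySem.List.pyGetD dist e.1 none with
      | none => exact Or.inl rfl
      | some du =>
        cases h2 : PySem.List.pyGetD dist e.2.1 none with
        | none => exact Or.inr rfl
        | some dv =>
          dsimp only
          split
          · exact Or.inr rfl
          · exact Or.inl rfl
    have hstep : pvRelaxB (dist, false) e = (dist, false) := by
      rcases halt with halt | halt
      · exact halt
      · exfalso
        have hpair : pvRelaxB (dist, false) e = ((pvRelaxB (dist, false) e).1, true) := by
          rw [Prod.ext_iff]
          exact ⟨rfl, halt⟩
        rw [hpair] at h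
        have hflag := pvFoldB_flag es (pvRelaxB (dist, false) e).1
        rw [h] at hflag
        exact Bool.noConfusion hflag
    rw [hstep] at h
    intro e' he' du hdu
    rcases List.mem_cons.mp he' with he' | he'
    · subst he'
      unfold pvRelaxB at hstep
      dsimp only at hstep
      rw [hdu] at hstep
      dsimp only at hstep
      rcases hv : PySem.List.pyGetD dist e'.2.1 none with _ | dv <;> rw [hv] at hstep <;> dsimp only at hstep
      · exfalso
        have := congrArg Prod.snd hstep
        simp at this
      · refine ⟨dv, rfl, ?_⟩
        split at hstep
        · exfalso
          have := congrArg Prod.snd hstep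
          simp at this
        · omega
    · exact ih h e' he' du hdu

theorem pvBfLoop_fix (edges : List (Int × Int × Nat)) (dist : List (Option Nat))
    (hwf : ∀ e ∈ edges, 0 ≤ e.2.1 ∧ e.2.1 < (dist.length : Int)) :
    edges.foldl pvRelaxB (pvBfLoop edges dist hwf, false) = (pvBfLoop edges dist hwf, false) := by
  fun_induction pvBfLoop with
  | case1 dist hwf h ih => exact ih
  | case2 dist hwf h =>
    rcases pvFoldB_dec edges (dist, false) hwf with hd | hd
    · have h1 : (pvRound edges dist).1 = dist := congrArg Prod.fst hd
      rw [h1]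
      exact hd
    · exact absurd hd.2 h

theorem pvB_eq_spec (N : Int) (squares : List Int) (hN : 1 ≤ N) :
    minimum_dice_rolls_to_goal_alt N squares = pvSpecOut N squares := by
  have hn0 : (0:Int) < N := by omega
  have key : ∀ (hwf0 : ∀ e ∈ pvEdgesB N squares, 0 ≤ e.2.1 ∧
      e.2.1 < (((PySem.List.pySetD (List.replicate N.toNat (none : Option Nat)) 0 (some 0)).length : Nat) : Int)),
      (match PySem.List.pyGetD (pvBfLoop (pvEdgesB N squares)
          (PySem.List.pySetD (List.replicate N.toNat (none : Option Nat)) 0 (some 0)) hwf0)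
          (N - 1) none with
       | some m => (m : Int)
       | none => -1) = pvSpecOut N squares := by
    intro hwf0
    set dist0 := PySem.List.pySetD (List.replicate N.toNat (none : Option Nat)) 0 (some 0) with hd0
    have hlen0 : dist0.length = N.toNat := by
      rw [hd0, PySem.List.length_pySetD, List.length_replicate]
    have hpb0 : pvPB N squares dist0 := by
      refine ⟨hlen0, ?_, ?_⟩
      · rw [hd0, pvDget_set (by omega) (by simp; omega) (by omega) (by simp; omega)]
        rw [if_pos rfl]
      · intro u m hu0 hu1 hgu
        rw [hd0, pvDget_set (by omega) (by simp; omega) hu0 (by simp; omega)] at hgu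
        split at hgu
        · rename_i hu
          subst hu
          have : (0:Nat) = m := Option.some.inj hgu
          subst this
          exact pvReach.zero
        · exfalso
          rw [PySem.List.pyGetD_eq_getElem _ none hu0 (by simp; omega)] at hgu
          simp at hgu
    have hedge : ∀ e ∈ pvEdgesB N squares, (e.2.1, e.2.2) ∈ pvSuccs N squares e.1 :=
      fun e he => pvMem_edgesB.mp he
    have hpbF := pvBfLoop_pb (pvEdgesB N squares) dist0 hwf0 hN hedge hpb0
    have hfixed := pvBfLoop_fix (pvEdgesB N squares) dist0 hwf0
    have hineq := pvFix_edges (pvEdgesB N squares)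
      (pvBfLoop (pvEdgesB N squares) dist0 hwf0) hfixed
    set distF := pvBfLoop (pvEdgesB N squares) dist0 hwf0 with hdF
    have hlenF : distF.length = N.toNat := hpbF.1
    have hcomp : ∀ (k : Nat) (v : Int), pvReach N squares k v →
        ∃ m, PySem.List.pyGetD distF v none = some m ∧ m ≤ k := by
      intro k v hR
      induction hR with
      | zero => exact ⟨0, hpbF.2.1, le_refl 0⟩
      | @step k u v w hRk hsucc ih =>
        obtain ⟨m, hm, hmle⟩ := ih
        have he' : ((u, v, w) : Int × Int × Nat) ∈ pvEdgesB N squares :=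
          pvMem_edgesB.mpr hsucc
        obtain ⟨dv, hdv, hle⟩ := hineq (u, v, w) he' m hm
        dsimp only at hdv hle
        exact ⟨dv, hdv, by omega⟩
    letI : DecidablePred (fun k => pvReach N squares k (N - 1)) := fun _ => Classical.propDecidable _
    letI : Decidable (∃ k, pvReach N squares k (N - 1)) := Classical.propDecidable _
    unfold pvSpecOut
    by_cases hre : ∃ k, pvReach N squares k (N - 1)
    · rw [dif_pos hre]
      obtain ⟨m, hm, hmle⟩ := hcomp _ _ (Nat.find_spec hre)
      have hR := hpbF.2.2 (N - 1) m (by omega) (by omega) hm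
      have h1 : Nat.find hre ≤ m := Nat.find_le hR
      have h2 : m = Nat.find hre := by omega
      rw [hm, h2]
    · rw [dif_neg hre]
      cases hF : PySem.List.pyGetD distF (N - 1) none with
      | none => rfl
      | some m =>
        exfalso
        exact hre ⟨m, hpbF.2.2 (N - 1) m (by omega) (by omega) hF⟩
  unfold minimum_dice_rolls_to_goal_alt
  rw [dif_neg (by omega)]
  exact key _

theorem pvA_nonpos (N : Int) (squares : List Int) (hN : N ≤ 0) :
    minimum_dice_rolls_to_goal N squares = -1 := by
  unfold minimum_dice_rolls_to_goal
  have hg : pvBuildGraph N squares = PySem.Dict.empty := by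
    unfold pvBuildGraph
    rw [PySem.List.pyRange_one_eq_nil (a := 0) (b := N) (by omega)]
    rfl
  dsimp only
  rw [hg]
  unfold pvDLoop
  rw [show pvPopMin [((0 : Int), (0 : Int))] = some ((0, 0), []) from rfl]
  dsimp only
  rw [if_neg (by simp [PySem.Set.empty])]
  rw [if_neg (by simp; omega)]
  rw [show (PySem.Dict.empty : PySem.Dict Int (List (Int × Int))).getD 0 [] = [] from rfl]
  rw [show ∀ st, pvRelaxA 0 (PySem.Set.add PySem.Set.empty 0) st [] = st from fun _ => rfl]
  unfold pvDLoop
  rfl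

-- the per-square edge list as A's graph stores it (Int weights)
def pvELine (N : Int) (squares : List Int) (i : Int) : List (Int × Int) :=
  if PySem.List.pyGetD squares i 0 == 0 then
    (PySem.List.pyRange 1 7 1).map (fun j => (if i + j < N then i + j else N - 1, (1 : Int)))
  else
    [(if 0 ≤ i + PySem.List.pyGetD squares i 0 ∧ i + PySem.List.pyGetD squares i 0 < N then
        i + PySem.List.pyGetD squares i 0 else N - 1, (0 : Int))]

theorem pvELine_eq_succs {N : Int} {squares : List Int} {i : Int} (hi : 0 ≤ i ∧ i < N) :
    pvELine N squares i = (pvSuccs N squares i).map (fun p => (p.1, (p.2 : Int))) := by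
  unfold pvELine pvSuccs
  rw [if_pos hi]
  split
  · rw [List.map_map]
    rfl
  · rfl

theorem pvStepG_getD (N : Int) (squares : List Int) (g : PySem.Dict Int (List (Int × Int)))
    (i k : Int) :
    ((fun (g : PySem.Dict Int (List (Int × Int))) (i : Int) =>
      if PySem.List.pyGetD squares i 0 == 0 then
        (PySem.List.pyRange 1 7 1).foldl (fun g2 j =>
          if i + j < N then g2.modify i [] (· ++ [(i + j, (1 : Int))])
          else g2.modify i [] (· ++ [(N - 1, (1 : Int))])) g
      else
        let ns := i + PySem.List.pyGetD squares i 0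
        if 0 ≤ ns ∧ ns < N then g.modify i [] (· ++ [(ns, (0 : Int))])
        else g.modify i [] (· ++ [(N - 1, (0 : Int))])) g i).getD k [] =
    if k = i then g.getD i [] ++ pvELine N squares i else g.getD k [] := by
  dsimp only
  unfold pvELine
  split
  · -- dice square: six weight-1 edges appended to key i
    have hbody : ∀ (g2 : PySem.Dict Int (List (Int × Int))) (j : Int),
        j ∈ PySem.List.pyRange 1 7 1 →
        (if i + j < N then g2.modify i [] (· ++ [(i + j, (1 : Int))])
         else g2.modify i [] (· ++ [(N - 1, (1 : Int))])) =
        g2.modify i [] (· ++ [(if i + j < N then i + j else N - 1, (1 : Int))]) := by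
      intro g2 j _
      split <;> simp_all
    rw [PySem.List.foldl_congr_mem _ _ _ _ hbody]
    rw [show (PySem.List.pyRange 1 7 1).foldl
        (fun g2 j => g2.modify i [] (· ++ [(if i + j < N then i + j else N - 1, (1 : Int))])) g =
      ((PySem.List.pyRange 1 7 1).map
        (fun j => (i, (if i + j < N then i + j else N - 1, (1 : Int))))).foldl
        (fun d p => d.modify p.1 [] (· ++ [p.2])) g from by rw [List.foldl_map]]
    rw [PySem.Dict.getD_foldl_modify_append]
    rw [List.filter_map, List.map_map]
    by_cases hk : k = i
    · subst hk
      rw [if_pos rfl]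
      congr 1
      rw [List.filter_eq_self.mpr (by intro j _; simp)]
      simp [Function.comp]
    · rw [if_neg hk]
      rw [show (PySem.List.pyRange 1 7 1).filter
          ((fun p => p.1 == k) ∘ (fun j => (i, (if i + j < N then i + j else N - 1, (1 : Int))))) = [] from by
        apply List.filter_eq_nil_iff.mpr
        intro j _
        simp
        omega]
      simp
  · -- teleport square: one weight-0 edge appended to key i
    split
    · rw [PySem.Dict.getD_modify]
    · rw [PySem.Dict.getD_modify]

theorem pvBuildFold_getD (N : Int) (squares : List Int) :
    ∀ (n : Nat), ((n : Nat) : Int) ≤ N → ∀ k,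
    ((PySem.List.pyRange 0 ((n : Nat) : Int) 1).foldl (fun (g : PySem.Dict Int (List (Int × Int))) (i : Int) =>
      if PySem.List.pyGetD squares i 0 == 0 then
        (PySem.List.pyRange 1 7 1).foldl (fun g2 j =>
          if i + j < N then g2.modify i [] (· ++ [(i + j, (1 : Int))])
          else g2.modify i [] (· ++ [(N - 1, (1 : Int))])) g
      else
        let ns := i + PySem.List.pyGetD squares i 0
        if 0 ≤ ns ∧ ns < N then g.modify i [] (· ++ [(ns, (0 : Int))])
        else g.modify i [] (· ++ [(N - 1, (0 : Int))])) PySem.Dict.empty).getD k [] =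
    if 0 ≤ k ∧ k < ((n : Nat) : Int) then pvELine N squares k else [] := by
  intro n
  induction n with
  | zero =>
    intro _ k
    rw [PySem.List.pyRange_one_eq_nil (a := 0) (b := ((0 : Nat) : Int)) (by omega)]
    rw [if_neg (by push_cast; omega)]
    rfl
  | succ n ih =>
    intro hn k
    have hcast : (((n + 1 : Nat)) : Int) = ((n : Nat) : Int) + 1 := by push_cast; ring
    rw [hcast, PySem.List.pyRange_one_succ_right (by omega), List.foldl_append]
    rw [List.foldl_cons, List.foldl_nil]
    rw [pvStepG_getD N squares _ ((n : Nat) : Int) k]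
    by_cases hk : k = ((n : Nat) : Int)
    · subst hk
      rw [if_pos rfl, ih (by omega) _, if_neg (by omega), if_pos (by omega)]
      rfl
    · rw [if_neg hk, ih (by omega) k]
      by_cases hk2 : 0 ≤ k ∧ k < ((n : Nat) : Int)
      · rw [if_pos hk2, if_pos (by omega)]
      · rw [if_neg hk2, if_neg (by omega)]

theorem pvBuildGraph_getD (N : Int) (squares : List Int) (hN : 0 ≤ N) (k : Int) :
    (pvBuildGraph N squares).getD k [] =
      (pvSuccs N squares k).map (fun p => (p.1, (p.2 : Int))) := by
  unfold pvBuildGraph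
  rw [show (PySem.List.pyRange 0 N 1) = PySem.List.pyRange 0 ((N.toNat : Nat) : Int) 1 from by
    congr 1
    omega]
  rw [pvBuildFold_getD N squares N.toNat (by omega) k]
  by_cases hk : 0 ≤ k ∧ k < N
  · rw [if_pos (by omega)]
    exact pvELine_eq_succs hk
  · rw [if_neg (by omega)]
    unfold pvSuccs
    rw [if_neg hk]
    rfl

theorem pvDLoop_eq_nil (N : Int) (g : PySem.Dict Int (List (Int × Int)))
    (dist : PySem.Dict Int Int) (vis : PySem.Set Int) :
    pvDLoop N g dist vis [] = -1 := by
  conv_lhs => rw [pvDLoop.eq_def]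
  rfl

theorem pvDLoop_eq_of_pop {pq : List (Int × Int)} {m : Int × Int} {rest : List (Int × Int)}
    (N : Int) (g : PySem.Dict Int (List (Int × Int))) (dist : PySem.Dict Int Int)
    (vis : PySem.Set Int) (hp : pvPopMin pq = some (m, rest)) :
    pvDLoop N g dist vis pq =
      if PySem.Set.contains vis m.2 then pvDLoop N g dist vis rest
      else if m.2 == N - 1 then m.1
      else
        pvDLoop N g (pvRelaxA m.1 (PySem.Set.add vis m.2) (dist, rest) (g.getD m.2 [])).1
          (PySem.Set.add vis m.2)
          (pvRelaxA m.1 (PySem.Set.add vis m.2) (dist, rest) (g.getD m.2 [])).2 := by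
  conv_lhs => rw [pvDLoop.eq_def]
  split
  · rename_i heq
    rw [heq] at hp
    simp at hp
  · rename_i m' rest' heq
    rw [heq] at hp
    have h1 := Option.some.inj hp
    have hm : m' = m := (congrArg Prod.fst h1)
    have hr : rest' = rest := (congrArg Prod.snd h1)
    subst hm
    subst hr
    rfl

theorem pvDLoop_spec (N : Int) (squares : List Int) (g : PySem.Dict Int (List (Int × Int)))
    (hg : ∀ u, g.getD u [] = (pvSuccs N squares u).map (fun p => (p.1, (p.2 : Int))))
    (hN : 1 ≤ N) :
    ∀ (dist : PySem.Dict Int Int) (vis : PySem.Set Int) (pq : List (Int × Int)),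
      pvINV N squares dist vis pq → pvDLoop N g dist vis pq = pvSpecOut N squares := by
  intro dist vis pq
  induction dist, vis, pq using pvDLoop.induct (N := N) (g := g) with
  | case1 dist vis pq hp =>
    intro hinv
    have hpq := pvPopMin_eq_none hp
    subst hpq
    rw [pvDLoop_eq_nil]
    have hre : ¬ ∃ k, pvReach N squares k (N - 1) := by
      rintro ⟨k, hk⟩
      obtain ⟨p, hppq, -⟩ := pvKey hinv k (N - 1) hk hinv.2.2.2.2.2.2.2
      simp at hppq
    letI : DecidablePred (fun k => pvReach N squares k (N - 1)) := fun _ => Classical.propDecidable _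
    letI : Decidable (∃ k, pvReach N squares k (N - 1)) := Classical.propDecidable _
    unfold pvSpecOut
    rw [dif_neg hre]
  | case2 dist vis pq m rest hp hvis ih =>
    intro hinv
    rw [pvDLoop_eq_of_pop N g dist vis hp, if_pos hvis]
    apply ih
    obtain ⟨hI1, hI2, hI3, hI4, hI5, hI6, hI7, hI8⟩ := hinv
    have hrest := pvPopMin_rest hp
    have hmvis : m.2 ∈ vis := (PySem.Set.contains_iff _ _).mp hvis
    refine ⟨?_, hI2, hI3, ?_, hI5, ?_, hI7, hI8⟩
    · intro p hpr
      exact hI1 p (by rw [hrest] at hpr; exact List.mem_of_mem_erase hpr)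
    · intro x dx hx hgx
      have hmem := hI4 x dx hx hgx
      rw [hrest]
      refine (List.mem_erase_of_ne ?_).mpr hmem
      intro hc
      have hxm : x = m.2 := congrArg Prod.snd hc
      rw [hxm] at hx
      exact hx hmvis
    · intro p hpr
      exact hI6 p (by rw [hrest] at hpr; exact List.mem_of_mem_erase hpr)
  | case3 dist vis pq m rest hp hvis hbeq =>
    intro hinv
    rw [pvDLoop_eq_of_pop N g dist vis hp, if_neg hvis, if_pos hbeq]
    have hgoal : m.2 = N - 1 := by simpa using hbeq
    have hmpq := pvPopMin_mem hp
    obtain ⟨hd0, hRd⟩ := hinv.1 m hmpq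
    rw [hgoal] at hRd
    have hre : ∃ k, pvReach N squares k (N - 1) := ⟨m.1.toNat, hRd⟩
    letI : DecidablePred (fun k => pvReach N squares k (N - 1)) := fun _ => Classical.propDecidable _
    letI : Decidable (∃ k, pvReach N squares k (N - 1)) := Classical.propDecidable _
    unfold pvSpecOut
    rw [dif_pos hre]
    have h1 : Nat.find hre ≤ m.1.toNat := Nat.find_le hRd
    obtain ⟨p, hppq, hple⟩ :=
      pvKey hinv (Nat.find hre) (N - 1) (Nat.find_spec hre) hinv.2.2.2.2.2.2.2
    have h2 : m.1 ≤ p.1 := pvPopMin_min hp p hppq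
    omega
  | case4 dist vis pq m rest hp hvis vis' hbeq st ih =>
    intro hinv
    rw [pvDLoop_eq_of_pop N g dist vis hp, if_neg hvis, if_neg hbeq]
    apply ih
    obtain ⟨hI1, hI2, hI3, hI4, hI5, hI6, hI7, hI8⟩ := hinv
    have hrest := pvPopMin_rest hp
    have hmpq := pvPopMin_mem hp
    have hminpop := pvPopMin_min hp
    have hu_nvis : m.2 ∉ vis := fun hc => hvis ((PySem.Set.contains_iff _ _).mpr hc)
    have hbne : m.2 ≠ N - 1 := by simpa using hbeq
    obtain ⟨hd0, hRd⟩ := hI1 m hmpq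
    -- the popped key is exactly the recorded tentative distance of the popped node
    obtain ⟨dx, hdx, hdxle⟩ := hI6 m hmpq
    have h4m := hI4 m.2 dx hu_nvis hdx
    have hdxm : dx = m.1 := le_antisymm hdxle (hminpop _ h4m)
    subst hdxm
    have hF0 : dist.get? m.2 = some m.1 := hdx
    have hminu : ∀ k : Nat, pvReach N squares k m.2 → m.1 ≤ (k : Int) := by
      intro k hk
      obtain ⟨p, hppq, hple⟩ := pvKey ⟨hI1, hI2, hI3, hI4, hI5, hI6, hI7, hI8⟩ k m.2 hk hu_nvis
      exact le_trans (hminpop p hppq) hple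
    have hL : ∀ e ∈ g.getD m.2 [], (e.1, e.2.toNat) ∈ pvSuccs N squares m.2 ∧ 0 ≤ e.2 := by
      intro e he
      rw [hg m.2, List.mem_map] at he
      obtain ⟨p, hps, rfl⟩ := he
      simpa using hps
    have j1 : ∀ p ∈ rest, 0 ≤ p.1 ∧ pvReach N squares p.1.toNat p.2 := by
      intro p hpr
      exact hI1 p (by rw [hrest] at hpr; exact List.mem_of_mem_erase hpr)
    have j4 : ∀ x dxx, x ∉ PySem.Set.add vis m.2 → dist.get? x = some dxx → (dxx, x) ∈ rest := by
      intro x dxx hx hgx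
      rw [PySem.Set.mem_add] at hx
      have hx1 : x ∉ vis := fun hc => hx (Or.inl hc)
      have hx2 : x ≠ m.2 := fun hc => hx (Or.inr hc)
      have hmem := hI4 x dxx hx1 hgx
      rw [hrest]
      refine (List.mem_erase_of_ne ?_).mpr hmem
      intro hc
      exact hx2 (congrArg Prod.snd hc)
    have j6 : ∀ p ∈ rest, ∃ dxx, dist.get? p.2 = some dxx ∧ dxx ≤ p.1 := by
      intro p hpr
      exact hI6 p (by rw [hrest] at hpr; exact List.mem_of_mem_erase hpr)
    obtain ⟨c1, c2, c3, c4, c5, c6, c7, c8⟩ :=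
      pvRelaxA_spec N squares m.1 m.2 (PySem.Set.add vis m.2) hd0 hRd
        (g.getD m.2 []) dist rest hL j1 hI2 j4 j6 hI7
    have hmem_u : m.2 ∈ PySem.Set.add vis m.2 := (PySem.Set.mem_add _ _ _).mpr (Or.inr rfl)
    refine ⟨c1, c2, ?_, c3, ?_, c4, c5, ?_⟩
    · -- finished nodes carry their exact distance
      intro x hx
      rcases (PySem.Set.mem_add _ _ _).mp hx with hx' | hx'
      · obtain ⟨dxx, hdxx, hmin⟩ := hI3 x hx'
        exact ⟨dxx, by rw [c6 x hx]; exact hdxx, hmin⟩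
      · subst hx'
        exact ⟨m.1, by rw [c6 m.2 hx]; exact hF0, hminu⟩
    · -- all finished nodes remain fully relaxed
      intro x hx vw hvw
      rcases (PySem.Set.mem_add _ _ _).mp hx with hx' | hx'
      · rcases hI5 x hx' vw hvw with hvin | ⟨dxx, dyy, hdxx, hdyy, hle⟩
        · exact Or.inl ((PySem.Set.mem_add _ _ _).mpr (Or.inl hvin))
        · obtain ⟨dy', hdy', hdy'le⟩ := c7 vw.1 dyy hdyy
          exact Or.inr ⟨dxx, dy', by rw [c6 x hx]; exact hdxx, hdy', by omega⟩
      · subst hx'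
        have he : ((vw.1, (vw.2 : Int)) : Int × Int) ∈ g.getD m.2 [] := by
          rw [hg m.2, List.mem_map]
          exact ⟨vw, hvw, rfl⟩
        rcases c8 _ he with hvin | ⟨dy, hdy, hle⟩
        · exact Or.inl hvin
        · exact Or.inr ⟨m.1, dy, by rw [c6 m.2 hx]; exact hF0, hdy, hle⟩
    · -- the goal is still unfinished
      intro hc
      rcases (PySem.Set.mem_add _ _ _).mp hc with hc' | hc'
      · exact hI8 hc'
      · exact hbne hc'.symm

theorem pvA_eq_spec (N : Int) (squares : List Int) (hN : 1 ≤ N) :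
    minimum_dice_rolls_to_goal N squares = pvSpecOut N squares := by
  unfold minimum_dice_rolls_to_goal
  dsimp only
  apply pvDLoop_spec N squares _ (fun u => pvBuildGraph_getD N squares (by omega) u) hN
  have hget : ∀ x : Int, ((PySem.Dict.empty : PySem.Dict Int Int).insert 0 0).get? x =
      if x = 0 then some 0 else none := by
    intro x
    rw [PySem.Dict.get?_insert]
    by_cases hx : x = 0
    · rw [if_pos hx, if_pos hx]
    · rw [if_neg hx, if_neg hx]
      rfl
  refine ⟨?_, ?_, ?_, ?_, ?_, ?_, ?_, ?_⟩
  · intro p hp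
    rw [List.mem_singleton] at hp
    subst hp
    exact ⟨le_refl 0, pvReach.zero⟩
  · intro x dx h
    rw [hget x] at h
    split at h
    · rename_i hx
      subst hx
      have h0 := Option.some.inj h
      subst h0
      exact ⟨le_refl 0, pvReach.zero⟩
    · simp at h
  · intro x hx
    simp [PySem.Set.empty] at hx
  · intro x dx _ h
    rw [hget x] at h
    split at h
    · rename_i hx
      subst hx
      have h0 := Option.some.inj h
      subst h0
      exact List.mem_singleton.mpr rfl
    · simp at h
  · intro x hx
    simp [PySem.Set.empty] at hx
  · intro p hp
    rw [List.mem_singleton] at hp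
    subst hp
    exact ⟨0, by rw [hget 0, if_pos rfl], le_refl 0⟩
  · rw [hget 0, if_pos rfl]
  · simp [PySem.Set.empty]

-- ===== VERDICT (by name: the statement is the Claim_ definition above) =====
theorem minimum_dice_rolls_to_goal_spec : Claim_equal_minimum_dice_rolls_to_goal := by
  intro N squares _ _
  unfold Spec_minimum_dice_rolls_to_goal
  by_cases hN : 1 ≤ N
  · rw [pvA_eq_spec N squares hN, pvB_eq_spec N squares hN]
  · rw [pvA_nonpos N squares (by omega)]
    unfold minimum_dice_rolls_to_goal_alt
    rw [dif_pos (by omega)]
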